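-- pv_equiv track=rewrite | github.com/rsoo23/advent_of_code | 2024/day_9/part_2.py | find_empty_space_start_index
-- ===== SOURCE A (Python) =====
-- def find_empty_space_start_index(blocks, file_block_len, file_block_end_index):
--     start_index = 0
--     empty_space_len = 0
--     empty_space_found = False
--     blocks_len = len(blocks)
--
--     for i, block in enumerate(blocks):
--         if block == '.':
--             if blocks[i - 1] != '.':
--                 start_index = i
--                 empty_space_len = 0
--
--             empty_space_len += 1
--             continue
--
--         if empty_space_len >= file_block_len and start_index < blocks_len - 1 - file_block_end_index:
--             empty_space_found = True
--             return start_index, empty_space_found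
--
--     return start_index, empty_space_found
-- ===== SOURCE B (Python) =====
-- def find_empty_space_start_index(blocks, file_block_len, file_block_end_index):
--     # Run-length scan: consume maximal runs with an inner pointer; check the
--     # found-condition once per file run, using the preceding empty run's length.
--     n = len(blocks)
--     start_index = 0
--     prev_empty_len = 0
--     i = 0
--     while i < n:
--         j = i
--         if blocks[i] == '.':
--             while j < n and blocks[j] == '.':
--                 j += 1
--             start_index = i
--             prev_empty_len = j - i
--         else:
--             while j < n and blocks[j] != '.':
--                 j += 1
--             if prev_empty_len >= file_block_len and start_index < n - 1 - file_block_end_index: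
--                 return start_index, True
--         i = j
--     return start_index, False
-- ===== Notes on version B (the rewrite author's own statement) =====
-- stated objective: alternative
-- what changed: Replaces A's per-element state machine (stale run-length counter plus a wraparound blocks[i-1] lookback to detect run starts) by a two-pointer run-length scan that consumes each maximal run at once and checks the found-condition once per file run.
import Mathlib
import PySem

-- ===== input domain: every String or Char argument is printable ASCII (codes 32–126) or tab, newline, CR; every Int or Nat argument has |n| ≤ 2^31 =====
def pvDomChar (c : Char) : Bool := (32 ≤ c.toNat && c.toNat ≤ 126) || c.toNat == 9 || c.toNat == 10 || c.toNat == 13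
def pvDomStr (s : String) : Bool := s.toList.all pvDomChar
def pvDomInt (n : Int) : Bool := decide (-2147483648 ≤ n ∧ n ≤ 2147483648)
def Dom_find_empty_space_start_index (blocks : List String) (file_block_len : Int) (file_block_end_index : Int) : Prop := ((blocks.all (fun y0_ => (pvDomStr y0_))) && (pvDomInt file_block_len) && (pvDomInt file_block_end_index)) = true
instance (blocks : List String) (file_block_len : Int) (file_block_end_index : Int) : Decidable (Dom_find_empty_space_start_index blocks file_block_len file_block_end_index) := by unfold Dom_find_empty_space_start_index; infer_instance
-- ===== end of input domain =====

-- B replaces A's per-element state machine (stale run length + wraparound lookback) by a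
-- two-pointer run-length scan that checks the found-condition once per file run (objective: alternative, same O(n) cost).

-- ===== PORT A =====
-- the enumerate loop with early return; i ranges over valid indices of a nonempty list,
-- so the Python lookup blocks[i-1] (index -1 wraps to the last element) never raises:
-- pyGetD's default "" is never used.
def pvGoA (blocks : List String) (blocksLen fbl fbei : Int) :
    List (Int × String) → Int → Int → Int × Bool
  | [], si, _ => (si, false)
  | (i, b) :: rest, si, el =>
    if b = "." then
      if PySem.List.pyGetD blocks (i - 1) "" ≠ "." then
        pvGoA blocks blocksLen fbl fbei rest i 1
      else
        pvGoA blocks blocksLen fbl fbei rest si (el + 1)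
    else
      if el ≥ fbl ∧ si < blocksLen - 1 - fbei then (si, true)
      else pvGoA blocks blocksLen fbl fbei rest si el

def find_empty_space_start_index (blocks : List String) (file_block_len : Int) (file_block_end_index : Int) : Int × Bool :=
  pvGoA blocks (blocks.length : Int) file_block_len file_block_end_index
    (PySem.List.enumerate blocks 0) 0 0

-- ===== PORT B =====
-- the outer while loop; the inner 'while blocks[j] ==/!= "."' pointer advance is takeWhile/dropWhile
def pvGoB (fbl fbei n : Int) : List String → Int → Int → Int → Int × Bool
  | [], _, si, _ => (si, false)
  | b :: t, i, si, pl =>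
    if hb : b = "." then
      let k := ((b :: t).takeWhile (fun x => x == ".")).length
      pvGoB fbl fbei n ((b :: t).dropWhile (fun x => x == ".")) (i + k) i k
    else
      let k := ((b :: t).takeWhile (fun x => !(x == "."))).length
      if pl ≥ fbl ∧ si < n - 1 - fbei then (si, true)
      else pvGoB fbl fbei n ((b :: t).dropWhile (fun x => !(x == "."))) (i + k) si pl
  termination_by l _ _ _ => l.length
  decreasing_by
  · simp [hb]
    exact List.length_dropWhile_le _ _
  · simp [hb]
    exact List.length_dropWhile_le _ _

def find_empty_space_start_index_alt (blocks : List String) (file_block_len : Int) (file_block_end_index : Int) : Int × Bool :=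
  pvGoB file_block_len file_block_end_index (blocks.length : Int) blocks 0 0 0

-- ===== PRECONDITION & SPEC =====
def Spec_find_empty_space_start_index (blocks : List String) (file_block_len : Int) (file_block_end_index : Int) (out : Int × Bool) : Prop := out = find_empty_space_start_index_alt blocks file_block_len file_block_end_index
instance (blocks : List String) (file_block_len : Int) (file_block_end_index : Int) (out : Int × Bool) : Decidable (Spec_find_empty_space_start_index blocks file_block_len file_block_end_index out) := by unfold Spec_find_empty_space_start_index; infer_instance

-- ===== CLAIM (what is proved, stated in full; the proofs are below) =====
def Claim_equal_find_empty_space_start_index : Prop := ∀ (blocks : List String) (file_block_len : Int) (file_block_end_index : Int), Dom_find_empty_space_start_index blocks file_block_len file_block_end_index → Spec_find_empty_space_start_index blocks file_block_len file_block_end_index (find_empty_space_start_index blocks file_block_len file_block_end_index)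

-- ===== LEMMAS AND PROOFS =====

-- reference: element-wise scan carrying the previous block explicitly (proof device)
def pvRef (fbl fbei n : Int) : List String → Int → Int → Int → String → Int × Bool
  | [], _, si, _, _ => (si, false)
  | b :: rest, i, si, el, prev =>
    if b = "." then
      if prev ≠ "." then pvRef fbl fbei n rest (i + 1) i 1 "."
      else pvRef fbl fbei n rest (i + 1) si (el + 1) "."
    else
      if el ≥ fbl ∧ si < n - 1 - fbei then (si, true)
      else pvRef fbl fbei n rest (i + 1) si el b

def pvPrevOf (blocks : List String) (p : Nat) : String :=
  if p = 0 then "x" else blocks.getD (p - 1) ""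

-- head of a dropWhile never satisfies the predicate (via the library find? characterisation)
theorem pvHeadDropWhileNe (p : String → Bool) (l : List String) (x : String)
    (h : (l.dropWhile p).head? = some x) : p x = false := by
  have h2 : l.find? (fun y => !(p y)) = some x := by
    rw [List.find?_not_eq_head?_dropWhile]; exact h
  simpa using List.find?_some h2

theorem pvLemA (blocks : List String) (fbl fbei : Int) :
    ∀ (l : List String) (p : Nat) (si el : Int),
      blocks.drop p = l →
      (p = 0 → si = 0 ∧ el = 0) →
      pvGoA blocks (blocks.length : Int) fbl fbei (PySem.List.enumerate l (p : Int)) si el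
        = pvRef fbl fbei (blocks.length : Int) l (p : Int) si el (pvPrevOf blocks p) := by
  intro l
  induction l with
  | nil =>
    intro p si el _ _
    simp [PySem.List.enumerate_nil, pvGoA, pvRef]
  | cons b t ih =>
    intro p si el hdrop h0
    have hbp : blocks[p]? = some b := by
      have h1 : (blocks.drop p)[0]? = blocks[p + 0]? := List.getElem?_drop
      rw [hdrop] at h1; simpa using h1.symm
    have hdrop' : blocks.drop (p + 1) = t := by
      rw [← List.tail_drop, hdrop]; rfl
    have hprev1 : pvPrevOf blocks (p + 1) = b := by
      simp [pvPrevOf, hbp]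
    have ih' := fun si' el' => ih (p + 1) si' el' hdrop' (by omega)
    rw [PySem.List.enumerate_cons]
    by_cases hb : b = "."
    · subst hb
      by_cases hp : p = 0
      · subst hp
        obtain ⟨hsi, hel⟩ := h0 rfl
        subst hsi; subst hel
        have key := ih' 0 1
        rw [hprev1] at key
        push_cast at key
        by_cases hL : PySem.List.pyGetD blocks ((0 : Int) - 1) "" = "."
        · simp [pvGoA, pvRef, pvPrevOf, hL, key]
        · simp [pvGoA, pvRef, pvPrevOf, hL, key]
      · have hcast : ((p : Int)) - 1 = (((p - 1 : Nat)) : Int) := by omega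
        have hprevp : pvPrevOf blocks p = blocks.getD (p - 1) "" := by
          simp [pvPrevOf, hp]
        by_cases hpr : blocks[p - 1]?.getD "" = "."
        · have key := ih' si (el + 1)
          rw [hprev1] at key
          push_cast at key
          simp [pvGoA, pvRef, hcast, PySem.List.pyGetD_natCast, hprevp, hpr, key]
        · have key := ih' (p : Int) 1
          rw [hprev1] at key
          push_cast at key
          simp [pvGoA, pvRef, hcast, PySem.List.pyGetD_natCast, hprevp, hpr, key]
    · have key := ih' si el
      rw [hprev1] at key
      push_cast at key
      by_cases hC : el ≥ fbl ∧ si < (blocks.length : Int) - 1 - fbei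
      · simp [pvGoA, pvRef, hb, hC]
      · simp [pvGoA, pvRef, hb, hC, key]

theorem pvRefRunDot (fbl fbei n : Int) :
    ∀ (run : List String) (rest : List String) (i si el : Int),
      (∀ x ∈ run, x = ".") →
      pvRef fbl fbei n (run ++ rest) i si el "."
        = pvRef fbl fbei n rest (i + run.length) si (el + run.length) "." := by
  intro run
  induction run with
  | nil => intro rest i si el _; simp
  | cons b t ihr =>
    intro rest i si el h
    have hb : b = "." := h b (by simp)
    simp only [List.cons_append, pvRef]
    rw [if_pos hb, if_neg (by simp)]
    rw [ihr rest (i + 1) si (el + 1) (fun x hx => h x (by simp [hx]))]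
    congr 1 <;> push_cast [List.length_cons] <;> ring

theorem pvRefRunFile (fbl fbei n : Int) :
    ∀ (run : List String) (rest : List String) (i si pl : Int) (prev : String),
      (∀ x ∈ run, x ≠ ".") → ¬(pl ≥ fbl ∧ si < n - 1 - fbei) → prev ≠ "." →
      ∃ q, q ≠ "." ∧
        pvRef fbl fbei n (run ++ rest) i si pl prev
          = pvRef fbl fbei n rest (i + run.length) si pl q := by
  intro run
  induction run with
  | nil => intro rest i si pl prev _ _ hp; exact ⟨prev, hp, by simp⟩
  | cons b t ihr =>
    intro rest i si pl prev hne hC hp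
    have hb : b ≠ "." := hne b (by simp)
    obtain ⟨q, hq, heq⟩ := ihr rest (i + 1) si pl b (fun x hx => hne x (by simp [hx])) hC hb
    refine ⟨q, hq, ?_⟩
    simp only [List.cons_append, pvRef]
    rw [if_neg hb, if_neg hC, heq]
    congr 1 <;> push_cast [List.length_cons] <;> ring

theorem pvLemB (fbl fbei n : Int) :
    ∀ (l : List String) (i si pl : Int) (prev : String),
      (l.head? = some "." → prev ≠ ".") →
      pvGoB fbl fbei n l i si pl = pvRef fbl fbei n l i si pl prev := by
  suffices H : ∀ (m : Nat) (l : List String), l.length ≤ m →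
      ∀ (i si pl : Int) (prev : String),
        (l.head? = some "." → prev ≠ ".") →
        pvGoB fbl fbei n l i si pl = pvRef fbl fbei n l i si pl prev by
    intro l i si pl prev hp
    exact H l.length l le_rfl i si pl prev hp
  intro m
  induction m with
  | zero =>
    intro l hl i si pl prev _
    have : l = [] := List.eq_nil_of_length_eq_zero (Nat.le_zero.mp hl)
    subst this
    simp [pvGoB, pvRef]
  | succ m ihm =>
    intro l hl i si pl prev hp
    cases l with
    | nil => simp [pvGoB, pvRef]
    | cons b t =>
      simp only [List.length_cons] at hl
      have hlt : t.length ≤ m := by omega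
      by_cases hb : b = "."
      · have hprev : prev ≠ "." := hp (by simp [hb])
        have hdw : (b :: t).dropWhile (fun x => x == ".") = t.dropWhile (fun x => x == ".") := by
          simp [List.dropWhile_cons, hb]
        have htw : (b :: t).takeWhile (fun x => x == ".") = b :: t.takeWhile (fun x => x == ".") := by
          simp [List.takeWhile_cons, hb]
        have hle : (t.dropWhile (fun x => x == ".")).length ≤ m :=
          le_trans (List.length_dropWhile_le _ _) hlt
        have hhead : ((t.dropWhile (fun x => x == ".")).head? = some "." → ("." : String) ≠ ".") := by
          intro hh
          have := pvHeadDropWhileNe _ _ _ hh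
          simp at this
        rw [pvGoB, dif_pos hb]
        simp only [htw, hdw, List.length_cons]
        rw [ihm (t.dropWhile (fun x => x == ".")) hle _ _ _ "." hhead]
        rw [pvRef, if_pos hb, if_pos hprev]
        conv_rhs => rw [show t = t.takeWhile (fun x => x == ".") ++ t.dropWhile (fun x => x == ".") from
          (List.takeWhile_append_dropWhile).symm]
        rw [pvRefRunDot fbl fbei n _ _ _ _ _
          (fun x hx => by simpa using List.mem_takeWhile_imp hx)]
        congr 1 <;> push_cast [List.length_cons] <;> ring
      · have hbb : (b == ".") = false := by simp [hb]
        rw [pvGoB, dif_neg hb, pvRef, if_neg hb]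
        by_cases hC : pl ≥ fbl ∧ si < n - 1 - fbei
        · rw [if_pos hC, if_pos hC]
        · rw [if_neg hC, if_neg hC]
          have htw : (b :: t).takeWhile (fun x => !(x == ".")) = b :: t.takeWhile (fun x => !(x == ".")) := by
            simp [List.takeWhile_cons, hbb]
          have hdw : (b :: t).dropWhile (fun x => !(x == ".")) = t.dropWhile (fun x => !(x == ".")) := by
            simp [List.dropWhile_cons, hbb]
          have hle : (t.dropWhile (fun x => !(x == "."))).length ≤ m :=
            le_trans (List.length_dropWhile_le _ _) hlt
          obtain ⟨q, hq, heq⟩ := pvRefRunFile fbl fbei n (t.takeWhile (fun x => !(x == ".")))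
            (t.dropWhile (fun x => !(x == "."))) (i + 1) si pl b
            (fun x hx => by simpa using List.mem_takeWhile_imp hx) hC hb
          conv_rhs => rw [show t = t.takeWhile (fun x => !(x == ".")) ++ t.dropWhile (fun x => !(x == ".")) from
            (List.takeWhile_append_dropWhile).symm]
          rw [heq]
          simp only [htw, hdw, List.length_cons]
          rw [ihm (t.dropWhile (fun x => !(x == "."))) hle _ _ _ q (fun _ => hq)]
          congr 1 <;> push_cast [List.length_cons] <;> ring

-- ===== VERDICT (by name: the statement is the Claim_ definition above) =====
theorem find_empty_space_start_index_spec : Claim_equal_find_empty_space_start_index := by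
  intro blocks fbl fbei _
  unfold Spec_find_empty_space_start_index
  unfold find_empty_space_start_index find_empty_space_start_index_alt
  have hA := pvLemA blocks fbl fbei blocks 0 0 0 (by simp) (by simp)
  have hB := pvLemB fbl fbei (blocks.length : Int) blocks 0 0 0 "x" (by intro _; decide)
  simpa using hA.trans hB.symm
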